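-- pv_equiv track=rewrite | github.com/DPFNeiland/Python-Environment | 2semestre/Atividade2/e4.py | Calcular_Produto_mais_vendido
-- ===== SOURCE A (Python) =====
-- def Calcular_Produto_mais_vendido(qtd_por_item: dict) -> list:
--
--     maior = -1
--     nome = []
--
--     for produto, qtd in qtd_por_item.items():
--         if qtd > maior:
--             nome = []
--             maior = qtd
--
--         if qtd == maior:
--             nome.append(produto)
--
--     return nome
-- ===== SOURCE B (Python) =====
-- def Calcular_Produto_mais_vendido(qtd_por_item: dict) -> list:
--     # Two passes: find the maximum quantity (floor -1), then collect matches.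
--     maior = -1
--     for qtd in qtd_por_item.values():
--         if qtd > maior:
--             maior = qtd
--     return [produto for produto, qtd in qtd_por_item.items() if qtd == maior]
-- ===== Notes on version B (the rewrite author's own statement) =====
-- stated objective: simpler
-- what changed: Replaced A's single interleaved reset-and-collect pass (mutating list state) by a max-finding pass with floor -1 followed by a separate list-comprehension filter.
import Mathlib
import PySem

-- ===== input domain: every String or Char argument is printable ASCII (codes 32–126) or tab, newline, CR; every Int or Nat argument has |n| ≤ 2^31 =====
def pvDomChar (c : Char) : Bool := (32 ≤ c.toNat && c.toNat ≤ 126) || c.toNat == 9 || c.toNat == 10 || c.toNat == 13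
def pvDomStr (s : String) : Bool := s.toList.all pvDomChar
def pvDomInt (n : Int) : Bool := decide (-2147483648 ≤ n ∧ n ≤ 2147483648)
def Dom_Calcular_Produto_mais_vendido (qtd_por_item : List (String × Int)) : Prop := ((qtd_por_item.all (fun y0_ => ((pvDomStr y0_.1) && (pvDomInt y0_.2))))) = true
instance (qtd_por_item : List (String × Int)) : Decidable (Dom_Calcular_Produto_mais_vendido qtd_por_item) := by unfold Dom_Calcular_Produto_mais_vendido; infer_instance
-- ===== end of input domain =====

-- B replaces A's interleaved reset-and-collect pass by a separate max pass (floor -1) plus a filter pass; objective: simpler.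


-- ===== PORT A =====
-- one fold over the items carrying (maior, nome), with the in-loop reset and append
def Calcular_Produto_mais_vendido (qtd_por_item : List (String × Int)) : List String :=
  (qtd_por_item.foldl
    (fun (st : Int × List String) pq =>
      let st1 := if pq.2 > st.1 then (pq.2, ([] : List String)) else st
      if pq.2 == st1.1 then (st1.1, st1.2 ++ [pq.1]) else st1)
    (-1, [])).2

-- ===== PORT B =====
-- first pass: maximum quantity with floor -1; second pass: filter the items equal to it
def Calcular_Produto_mais_vendido_alt (qtd_por_item : List (String × Int)) : List String :=
  let maior := qtd_por_item.foldl (fun m pq => if pq.2 > m then pq.2 else m) (-1)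
  (qtd_por_item.filter (fun pq => pq.2 == maior)).map Prod.fst

-- ===== PRECONDITION & SPEC =====
def Spec_Calcular_Produto_mais_vendido (qtd_por_item : List (String × Int)) (out : List String) : Prop := out = Calcular_Produto_mais_vendido_alt qtd_por_item
instance (qtd_por_item : List (String × Int)) (out : List String) : Decidable (Spec_Calcular_Produto_mais_vendido qtd_por_item out) := by unfold Spec_Calcular_Produto_mais_vendido; infer_instance

-- ===== CLAIM (what is proved, stated in full; the proofs are below) =====
def Claim_equal_Calcular_Produto_mais_vendido : Prop := ∀ (qtd_por_item : List (String × Int)), Dom_Calcular_Produto_mais_vendido qtd_por_item → Spec_Calcular_Produto_mais_vendido qtd_por_item (Calcular_Produto_mais_vendido qtd_por_item)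

-- ===== LEMMAS AND PROOFS =====

-- the final maximum never decreases along the fold
theorem pv_maxfold_ge (l : List (String × Int)) (m : Int) :
    m ≤ l.foldl (fun m pq => if pq.2 > m then pq.2 else m) m := by
  induction l generalizing m with
  | nil => simp
  | cons hd tl ih =>
    simp only [List.foldl_cons]
    split
    · exact le_trans (le_of_lt (by assumption)) (ih hd.2)
    · exact ih m

-- invariant of A's fold: it ends at the running max M, and nome is the old
-- accumulator (kept only if no reset happened, i.e. M = m) followed by the
-- names of all items of l whose quantity equals M
theorem pv_foldA_eq (l : List (String × Int)) (m : Int) (acc : List String) :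
    l.foldl
      (fun (st : Int × List String) pq =>
        let st1 := if pq.2 > st.1 then (pq.2, ([] : List String)) else st
        if pq.2 == st1.1 then (st1.1, st1.2 ++ [pq.1]) else st1)
      (m, acc)
    = (l.foldl (fun m pq => if pq.2 > m then pq.2 else m) m,
       (if l.foldl (fun m pq => if pq.2 > m then pq.2 else m) m = m then acc else [])
         ++ (l.filter (fun pq => pq.2 == l.foldl (fun m pq => if pq.2 > m then pq.2 else m) m)).map Prod.fst) := by
  induction l generalizing m acc with
  | nil => simp
  | cons hd tl ih =>
    obtain ⟨p, q⟩ := hd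
    simp only [List.foldl_cons, List.filter_cons]
    by_cases hq : q > m
    · simp only [if_pos hq]
      have hM : m < tl.foldl (fun m pq => if pq.2 > m then pq.2 else m) q := lt_of_lt_of_le hq (pv_maxfold_ge tl q)
      by_cases heq : q = tl.foldl (fun m pq => if pq.2 > m then pq.2 else m) q
      · simp only [show (q == q) = true by simp]
        rw [ih]
        simp [← heq, hq.ne']
      · simp only [show (q == q) = true by simp]
        rw [ih]
        have h1 : ¬ (q == tl.foldl (fun m pq => if pq.2 > m then pq.2 else m) q) = true := by
          simpa using heq
        have h2 : ¬ tl.foldl (fun m pq => if pq.2 > m then pq.2 else m) q = q :=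
          fun h => heq h.symm
        simp [h1, h2, hM.ne']
    · simp only [if_neg hq]
      have hmM : m ≤ tl.foldl (fun m pq => if pq.2 > m then pq.2 else m) m := pv_maxfold_ge tl m
      by_cases hqe : q = m
      · subst hqe
        simp only [show (q == q) = true by simp]
        rw [ih]
        by_cases hMm : tl.foldl (fun m pq => if pq.2 > m then pq.2 else m) q = q
        · simp [hMm]
        · have : ¬ (q == tl.foldl (fun m pq => if pq.2 > m then pq.2 else m) q) = true := by
            simpa using fun h => hMm h.symm
          simp [hMm, this]
      · have hlt : q < m := lt_of_le_of_ne (not_lt.mp hq) hqe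
        have hne : ¬ (q == m) = true := by simpa using hqe
        simp only [if_neg hne]
        rw [ih]
        have hqM : ¬ (q == tl.foldl (fun m pq => if pq.2 > m then pq.2 else m) m) = true := by
          simpa using (lt_of_lt_of_le hlt hmM).ne
        simp [hqM]

-- ===== VERDICT (by name: the statement is the Claim_ definition above) =====
theorem Calcular_Produto_mais_vendido_spec : Claim_equal_Calcular_Produto_mais_vendido := by
  intro l _
  unfold Spec_Calcular_Produto_mais_vendido Calcular_Produto_mais_vendido Calcular_Produto_mais_vendido_alt
  rw [pv_foldA_eq]
  split <;> simp
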